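-- pv_equiv track=rewrite | github.com/JavierOrdonezA/collaboration_maria_javier | generate_peptides_final_version_LOCAL.py | generate_sequence_vectors
-- ===== SOURCE A (Python) =====
-- from typing import List, Tuple, Dict, Optional, Any
--
-- def generate_sequence_vectors(
--
--     sequences: List[str]
-- ) -> Tuple[List[List[int]], List[List[int]]]:
--     """
--     For each RNA sequence, build
--       1. a list of consecutive 1-based positions (vec_num),
--       2. a list of codon-grouped positions (vec_grouped: 1,1,1,2,2,2,…).
--
--     Returns
--     -------
--     vec_num : List[List[int]]
--     vec_grouped : List[List[int]]
--     """
--     vec_num = []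
--     counter = 1
--     for seq in sequences:
--         length = len(seq)
--         vec_num.append(list(range(counter, counter + length)))
--         counter += length
--
--     # build a flat codon‐grouped vector
--     total_length = sum(len(seq) for seq in sequences)
--     num_blocks = (total_length + 2) // 3
--     flat_group = []
--     for block in range(1, num_blocks + 1):
--         flat_group.extend([block] * 3)
--
--     vec_grouped = []
--     start = 0
--     for seq in sequences:
--         end = start + len(seq)
--         vec_grouped.append(flat_group[start:end])
--         start = end
--
--     return vec_num, vec_grouped
-- ===== SOURCE B (Python) =====
-- def generate_sequence_vectors(sequences):
--     vec_num = []
--     vec_grouped = []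
--     counter = 0
--     for seq in sequences:
--         L = len(seq)
--         vec_num.append(list(range(counter + 1, counter + L + 1)))
--         vec_grouped.append([p // 3 + 1 for p in range(counter, counter + L)])
--         counter += L
--     return vec_num, vec_grouped
-- ===== Notes on version B (the rewrite author's own statement) =====
-- stated objective: simpler
-- what changed: One pass with a 0-based position counter computing each codon group arithmetically as p//3+1, instead of three passes that build a flat block table and slice it per sequence.
import Mathlib
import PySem

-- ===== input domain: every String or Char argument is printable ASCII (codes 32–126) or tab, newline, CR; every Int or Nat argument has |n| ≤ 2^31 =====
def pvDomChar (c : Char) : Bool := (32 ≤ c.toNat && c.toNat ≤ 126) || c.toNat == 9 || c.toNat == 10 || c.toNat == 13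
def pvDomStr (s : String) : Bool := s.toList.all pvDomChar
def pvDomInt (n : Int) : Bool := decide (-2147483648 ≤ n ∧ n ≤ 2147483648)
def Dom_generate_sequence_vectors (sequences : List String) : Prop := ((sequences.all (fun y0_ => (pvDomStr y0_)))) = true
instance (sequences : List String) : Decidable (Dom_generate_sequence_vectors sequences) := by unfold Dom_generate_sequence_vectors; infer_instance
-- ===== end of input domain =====

-- B replaces A's three passes (positions; a flat codon-block table; per-sequence slicing) by one
-- pass with a 0-based position counter computing each codon group arithmetically as p//3+1 (simpler).


-- ===== PORT A =====
def generate_sequence_vectors (sequences : List String) : List (List Int) × List (List Int) :=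
  -- first loop: vec_num with 1-based counter
  let st1 := sequences.foldl
    (fun (acc : List (List Int) × Int) seq =>
      let length : Int := PySem.Str.len seq
      (acc.1 ++ [PySem.List.pyRange acc.2 (acc.2 + length) 1], acc.2 + length))
    ([], 1)
  let vec_num := st1.1
  -- total_length = sum(len(seq) for seq in sequences)
  let total_length : Int := (sequences.map (fun seq => PySem.Str.len seq)).sum
  let num_blocks : Int := PySem.Int.floordiv (total_length + 2) 3
  -- flat_group built by extending [block]*3 per block
  let flat_group : List Int := (PySem.List.pyRange 1 (num_blocks + 1) 1).foldl
    (fun acc block => acc ++ [block, block, block]) []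
  -- second loop over sequences: slice flat_group
  let st2 := sequences.foldl
    (fun (acc : List (List Int) × Int) seq =>
      let e := acc.2 + PySem.Str.len seq
      (acc.1 ++ [PySem.List.slice flat_group (some acc.2) (some e)], e))
    ([], 0)
  (vec_num, st2.1)

-- ===== PORT B =====
def generate_sequence_vectors_alt (sequences : List String) : List (List Int) × List (List Int) :=
  let st := sequences.foldl
    (fun (acc : List (List Int) × List (List Int) × Int) seq =>
      let L : Int := PySem.Str.len seq
      let c : Int := acc.2.2
      (acc.1 ++ [PySem.List.pyRange (c + 1) (c + L + 1) 1],
       acc.2.1 ++ [(PySem.List.pyRange c (c + L) 1).map (fun p => PySem.Int.floordiv p 3 + 1)],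
       c + L))
    ([], [], 0)
  (st.1, st.2.1)

-- ===== PRECONDITION & SPEC =====
def Spec_generate_sequence_vectors (sequences : List String) (out : List (List Int) × List (List Int)) : Prop := out = generate_sequence_vectors_alt sequences
instance (sequences : List String) (out : List (List Int) × List (List Int)) : Decidable (Spec_generate_sequence_vectors sequences out) := by unfold Spec_generate_sequence_vectors; infer_instance

-- ===== CLAIM (what is proved, stated in full; the proofs are below) =====
def Claim_equal_generate_sequence_vectors : Prop := ∀ (sequences : List String), Dom_generate_sequence_vectors sequences → Spec_generate_sequence_vectors sequences (generate_sequence_vectors sequences)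

-- ===== LEMMAS AND PROOFS =====

-- per-sequence position vectors, counter c is the 1-based first position
def numsF (c : Int) : List String → List (List Int)
  | [] => []
  | s :: r => PySem.List.pyRange c (c + PySem.Str.len s) 1 :: numsF (c + PySem.Str.len s) r

-- per-sequence grouped vectors computed arithmetically from 0-based position c
def grpF (c : Int) : List String → List (List Int)
  | [] => []
  | s :: r => (PySem.List.pyRange c (c + PySem.Str.len s) 1).map
                (fun p => PySem.Int.floordiv p 3 + 1) :: grpF (c + PySem.Str.len s) r

-- per-sequence grouped vectors as A slices them from the flat table
def grpSliceF (fg : List Int) (c : Int) : List String → List (List Int)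
  | [] => []
  | s :: r => PySem.List.slice fg (some c) (some (c + PySem.Str.len s)) ::
              grpSliceF fg (c + PySem.Str.len s) r

def totalLen (seqs : List String) : Int := (seqs.map (fun s => PySem.Str.len s)).sum

-- the flat table for k blocks
def table : Nat → List Int
  | 0 => []
  | k + 1 => table k ++ [(k : Int) + 1, (k : Int) + 1, (k : Int) + 1]

theorem len_nonneg (s : String) : 0 ≤ PySem.Str.len s := by
  simp [PySem.Str.len_eq]

theorem totalLen_nonneg (seqs : List String) : 0 ≤ totalLen seqs := by
  induction seqs with
  | nil => simp [totalLen]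
  | cons s r ih =>
      have := len_nonneg s
      simp only [totalLen, List.map_cons, List.sum_cons] at *
      omega

-- A's first loop
theorem foldl_nums (seqs : List String) (l : List (List Int)) (c : Int) :
    seqs.foldl
      (fun (acc : List (List Int) × Int) seq =>
        let length : Int := PySem.Str.len seq
        (acc.1 ++ [PySem.List.pyRange acc.2 (acc.2 + length) 1], acc.2 + length))
      (l, c)
    = (l ++ numsF c seqs, c + totalLen seqs) := by
  induction seqs generalizing l c with
  | nil => simp [numsF, totalLen]
  | cons s r ih =>
      simp only [List.foldl_cons, ih, numsF, totalLen, List.map_cons, List.sum_cons,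
        Prod.mk.injEq]
      refine ⟨by simp, by ring⟩

-- A's slicing loop
theorem foldl_slices (fg : List Int) (seqs : List String) (l : List (List Int)) (c : Int) :
    seqs.foldl
      (fun (acc : List (List Int) × Int) seq =>
        let e := acc.2 + PySem.Str.len seq
        (acc.1 ++ [PySem.List.slice fg (some acc.2) (some e)], e))
      (l, c)
    = (l ++ grpSliceF fg c seqs, c + totalLen seqs) := by
  induction seqs generalizing l c with
  | nil => simp [grpSliceF, totalLen]
  | cons s r ih =>
      simp only [List.foldl_cons, ih, grpSliceF, totalLen, List.map_cons, List.sum_cons,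
        Prod.mk.injEq]
      refine ⟨by simp, by ring⟩

-- B's single loop
theorem foldl_alt (seqs : List String) (l1 l2 : List (List Int)) (c : Int) :
    seqs.foldl
      (fun (acc : List (List Int) × List (List Int) × Int) seq =>
        let L : Int := PySem.Str.len seq
        let c : Int := acc.2.2
        (acc.1 ++ [PySem.List.pyRange (c + 1) (c + L + 1) 1],
         acc.2.1 ++ [(PySem.List.pyRange c (c + L) 1).map (fun p => PySem.Int.floordiv p 3 + 1)],
         c + L))
      (l1, l2, c)
    = (l1 ++ numsF (c + 1) seqs, l2 ++ grpF c seqs, c + totalLen seqs) := by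
  induction seqs generalizing l1 l2 c with
  | nil => simp [numsF, grpF, totalLen]
  | cons s r ih =>
      simp only [List.foldl_cons, ih, numsF, grpF, totalLen, List.map_cons, List.sum_cons,
        Prod.mk.injEq]
      refine ⟨?_, ?_, by ring⟩
      · rw [show c + PySem.Str.len s + 1 = c + 1 + PySem.Str.len s from by ring]
        simp
      · simp

-- the flat-table foldl computes `table`
theorem flat_group_eq_table (k : Nat) :
    (PySem.List.pyRange 1 ((k : Int) + 1) 1).foldl
      (fun acc block => acc ++ [block, block, block]) []
    = table k := by
  induction k with
  | zero => simp [PySem.List.pyRange_one_eq_nil, table]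
  | succ k ih =>
      have h : PySem.List.pyRange 1 (((k + 1 : Nat) : Int) + 1) 1
          = PySem.List.pyRange 1 ((k : Int) + 1) 1 ++ [(k : Int) + 1] := by
        have h1 := PySem.List.pyRange_one_succ_right (show (1 : Int) ≤ (k : Int) + 1 by omega)
        push_cast
        rw [h1]
      rw [h, List.foldl_append, ih]
      simp [table]

theorem table_length (k : Nat) : (table k).length = 3 * k := by
  induction k with
  | zero => simp [table]
  | succ k ih => simp [table, ih]; omega

theorem table_getElem? (k i : Nat) (hi : i < 3 * k) :
    (table k)[i]? = some (((i / 3 : Nat) : Int) + 1) := by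
  induction k with
  | zero => omega
  | succ k ih =>
      rw [show table (k+1) = table k ++ [(k : Int) + 1, (k : Int) + 1, (k : Int) + 1] from rfl]
      have hlen : (table k).length = 3 * k := table_length k
      by_cases h : i < 3 * k
      · rw [List.getElem?_append_left (by omega)]
        exact ih h
      · rw [List.getElem?_append_right (by omega)]
        have hd : i / 3 = k := by omega
        rw [hd, hlen]
        set j := i - 3 * k with hj
        have hj3 : j < 3 := by omega
        interval_cases j <;> simp

-- slicing the table = arithmetic groups
theorem slice_table (k a L : Nat) (h : a + L ≤ 3 * k) :
    PySem.List.slice (table k) (some (a : Int)) (some ((a : Int) + (L : Int)))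
    = (PySem.List.pyRange (a : Int) ((a : Int) + (L : Int)) 1).map
        (fun p => PySem.Int.floordiv p 3 + 1) := by
  rw [PySem.List.slice_natCast_add, PySem.List.pyRange_one]
  have hL : (((a : Int) + (L : Int)) - (a : Int)).toNat = L := by omega
  rw [hL, List.map_map]
  apply List.ext_getElem
  · rw [List.length_take, List.length_drop, table_length]
    simp
    omega
  · intro i h1 h2
    rw [List.getElem_take, List.getElem_drop]
    have hai : a + i < 3 * k := by
      rw [List.length_take, List.length_drop, table_length] at h1
      omega
    have hg := table_getElem? k (a + i) hai
    rw [List.getElem?_eq_getElem (by rw [table_length]; omega)] at hg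
    simp only [Option.some.injEq] at hg
    rw [hg]
    simp only [List.getElem_map, List.getElem_range, Function.comp]
    have hfd : PySem.Int.floordiv (((a + i : Nat) : Int)) (((3 : Nat) : Int))
        = (((a + i) / 3 : Nat) : Int) := PySem.Int.floordiv_natCast (a + i) 3
    push_cast at hfd ⊢
    rw [← hfd]

-- per-sequence: slicing from the table agrees with arithmetic groups
theorem grpSliceF_eq_grpF (k : Nat) (seqs : List String) (c : Nat)
    (h : (c : Int) + totalLen seqs ≤ 3 * k) :
    grpSliceF (table k) (c : Int) seqs = grpF (c : Int) seqs := by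
  induction seqs generalizing c with
  | nil => simp [grpSliceF, grpF]
  | cons s r ih =>
      have hs := len_nonneg s
      have hr := totalLen_nonneg r
      have htot : totalLen (s :: r) = PySem.Str.len s + totalLen r := by
        simp [totalLen]
      rw [htot] at h
      have hLnat : ∃ L : Nat, PySem.Str.len s = (L : Int) := ⟨(PySem.Str.len s).toNat, by omega⟩
      obtain ⟨L, hL⟩ := hLnat
      simp only [grpSliceF, grpF, hL, List.cons.injEq]
      refine ⟨?_, ?_⟩
      · exact slice_table k c L (by omega)
      · rw [show (c : Int) + (L : Int) = ((c + L : Nat) : Int) by push_cast; ring]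
        exact ih (c + L) (by push_cast at h ⊢; omega)

-- num_blocks covers the total length
theorem total_le_blocks (T : Int) (hT : 0 ≤ T) :
    T ≤ 3 * PySem.Int.floordiv (T + 2) 3 ∧ 0 ≤ PySem.Int.floordiv (T + 2) 3 := by
  rw [PySem.Int.floordiv_eq_ediv_of_pos (by omega)]
  omega

-- ===== VERDICT (by name: the statement is the Claim_ definition above) =====
theorem generate_sequence_vectors_spec : Claim_equal_generate_sequence_vectors := by
  intro seqs _
  unfold Spec_generate_sequence_vectors generate_sequence_vectors generate_sequence_vectors_alt
  simp only
  rw [foldl_nums, foldl_alt, foldl_slices]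
  simp only [List.nil_append]
  have hT : totalLen seqs = (seqs.map (fun s => PySem.Str.len s)).sum := rfl
  set T := (seqs.map (fun s => PySem.Str.len s)).sum with hTdef
  have hT0 : 0 ≤ T := by rw [← hT]; exact totalLen_nonneg seqs
  obtain ⟨hle, hnb0⟩ := total_le_blocks T hT0
  set n := PySem.Int.floordiv (T + 2) 3 with hn
  have hk : n = ((n.toNat : Nat) : Int) := by omega
  have hfg : (PySem.List.pyRange 1 (n + 1) 1).foldl
      (fun acc block => acc ++ [block, block, block]) [] = table n.toNat := by
    rw [hk]
    exact flat_group_eq_table n.toNat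
  rw [hfg]
  have := grpSliceF_eq_grpF n.toNat seqs 0 (by push_cast; omega)
  simp only [Nat.cast_zero] at this
  rw [this]
  norm_num
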